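-- pv_equiv track=rewrite | github.com/Scruf/SchoolAssignments | CSCI262/nfaToDfa.py | nfa_states_to_dfa
-- ===== SOURCE A (Python) =====
-- def subsets(my_set):
--     """
--     :param my_set: input set of elements
--     :return: set of all possible subsets
--     of the input set
--     """
--     result = [[]]
--     for x in my_set:
--         result += [y + [x] for y in result]
--     for x in result:
--         x.sort()
--     return result
--
-- def nfa_states_to_dfa(states):
--     """
--     :param states: nfa states
--     :return: dfa states
--     """
--     states_temp = list(states)
--     result = subsets(states_temp)
--     s = {'@'}
--     for state in result:
--         temp = ""
--         for x in state:
--             temp += '-' + x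
--         temp = temp[1:]
--         s.add(temp)
--
--     if '' in s:
--         s.remove('')
--     return s
-- ===== SOURCE B (Python) =====
-- def nfa_states_to_dfa(states):
--     """
--     :param states: nfa states
--     :return: dfa states
--     """
--     def insert_sorted(x, lst):
--         # insert x into the already-sorted list lst (before equal elements)
--         if not lst or not lst[0] < x:
--             return [x] + lst
--         return [lst[0]] + insert_sorted(x, lst[1:])
--
--     def sorted_subsets(xs):
--         # all subsets of xs, each already in sorted order, built recursively
--         if not xs:
--             return [[]]
--         tails = sorted_subsets(xs[1:])
--         out = []
--         for sub in tails:
--             out.append(sub)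
--             out.append(insert_sorted(xs[0], sub))
--         return out
--
--     s = {'@'}
--     for sub in sorted_subsets(list(states)):
--         name = '-'.join(sub)
--         if name:
--             s.add(name)
--     return s
-- ===== Notes on version B (the rewrite author's own statement) =====
-- stated objective: alternative
-- what changed: Replaces A's iterative list-doubling powerset followed by an in-place sort of every subset and a build-then-remove of the empty name with a recursion on the state list that keeps each subset sorted by ordered insertion and skips empty names while joining.
import Mathlib
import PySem

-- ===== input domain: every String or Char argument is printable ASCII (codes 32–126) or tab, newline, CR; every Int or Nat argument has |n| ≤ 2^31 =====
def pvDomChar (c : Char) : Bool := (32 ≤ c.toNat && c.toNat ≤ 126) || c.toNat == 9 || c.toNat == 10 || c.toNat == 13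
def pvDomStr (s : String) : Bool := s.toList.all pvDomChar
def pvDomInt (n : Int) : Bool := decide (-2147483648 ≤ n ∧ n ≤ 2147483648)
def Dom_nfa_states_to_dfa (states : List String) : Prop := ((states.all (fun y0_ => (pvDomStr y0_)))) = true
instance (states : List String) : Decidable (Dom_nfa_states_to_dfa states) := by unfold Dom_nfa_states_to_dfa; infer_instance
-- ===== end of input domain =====

-- B replaces A's iterative subset-doubling followed by a per-subset sort with a recursion on the
-- state list that keeps every subset sorted by ordered insertion and skips empty names (objective:
-- alternative). Return-value equivalence only: both Pythons return a fresh set and mutate nothing.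

-- ===== PORT A =====
-- strings are handled on the List Char side (PySem.Chars) and converted with String.ofList when
-- added to the set; temp[1:] is PySem.List.slice; the guarded s.remove('') is PySem.Set.discard.
def pySubsets (my_set : List String) : List (List String) :=
  let result := my_set.foldl (fun result x => result ++ result.map (fun y => y ++ [x])) [[]]
  result.map (fun x => PySem.List.sorted x (fun s => s) false)

def nfa_states_to_dfa (states : List String) : List String :=
  let states_temp := states
  let result := pySubsets states_temp
  let s : PySem.Set String := PySem.Set.ofList ["@"]
  let s := result.foldl (fun s state =>
      PySem.Set.add s (String.ofList
        (PySem.List.slice (state.foldl (fun t x => t ++ ('-' :: x.toList)) []) (some 1) none))) s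
  if PySem.Set.contains s "" then PySem.Set.discard s "" else s

-- ===== PORT B =====
def insertSorted (x : String) : List String → List String
  | [] => [x]
  | y :: ys => if y < x then y :: insertSorted x ys else x :: y :: ys

def sortedSubsets : List String → List (List String)
  | [] => [[]]
  | x :: rest => (sortedSubsets rest).foldl (fun out sub => out ++ [sub] ++ [insertSorted x sub]) []

def nfa_states_to_dfa_alt (states : List String) : List String :=
  let subs := sortedSubsets states
  subs.foldl (fun s sub =>
      let name := PySem.Str.join "-" sub
      if name = "" then s else PySem.Set.add s name) (PySem.Set.ofList ["@"])

-- ===== PRECONDITION & SPEC =====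
def Spec_nfa_states_to_dfa (states : List String) (out : List String) : Prop := out = nfa_states_to_dfa_alt states
instance (states : List String) (out : List String) : Decidable (Spec_nfa_states_to_dfa states out) := by unfold Spec_nfa_states_to_dfa; infer_instance

-- ===== CLAIM (what is proved, stated in full; the proofs are below) =====
def Claim_equal_nfa_states_to_dfa : Prop := ∀ (states : List String), Dom_nfa_states_to_dfa states → Spec_nfa_states_to_dfa states (nfa_states_to_dfa states)

-- ===== LEMMAS AND PROOFS =====

-- insertSorted is Mathlib's orderedInsert for ≤ on String
theorem insertSorted_eq_orderedInsert (x : String) (t : List String) :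
    insertSorted x t = List.orderedInsert (· ≤ ·) x t := by
  induction t with
  | nil => rfl
  | cons y ys ih =>
    by_cases h : y < x
    · simp [insertSorted, List.orderedInsert, h, not_le.mpr h, ih]
    · simp [insertSorted, List.orderedInsert, h, not_lt.mp h]

-- sorting a cons = ordered insertion into the sorted tail
theorem sort_cons (x : String) (S : List String) :
    PySem.List.sorted (x :: S) (fun s => s) false
      = insertSorted x (PySem.List.sorted S (fun s => s) false) := by
  rw [insertSorted_eq_orderedInsert]
  apply PySem.List.sorted_id_eq_of_perm_of_pairwise
  · exact (List.perm_orderedInsert _ x _).trans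
      ((PySem.List.sorted_perm S (fun s => s) false).cons x)
  · exact List.Pairwise.orderedInsert x _ (PySem.List.sorted_pairwise S (fun s => s))

-- A's doubling fold commutes with the "with/without x" expansion
theorem foldA_flatMap (x : String) (l : List String) :
    ∀ (res : List (List String)),
    List.foldl (fun r y => r ++ r.map (fun s => s ++ [y]))
        (res.flatMap (fun S => [S, x :: S])) l
      = (List.foldl (fun r y => r ++ r.map (fun s => s ++ [y])) res l).flatMap
          (fun S => [S, x :: S]) := by
  induction l with
  | nil => intro res; rfl
  | cons y ys ih =>
    intro res
    simp only [List.foldl_cons]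
    rw [← ih]
    congr 1
    simp [List.flatMap_append, List.map_flatMap, List.flatMap_map]

theorem rawSubsets_cons (x : String) (l : List String) :
    List.foldl (fun r y => r ++ r.map (fun s => s ++ [y])) [[]] (x :: l)
      = (List.foldl (fun r y => r ++ r.map (fun s => s ++ [y])) [[]] l).flatMap
          (fun S => [S, x :: S]) := by
  rw [← foldA_flatMap]
  rfl

theorem sortedSubsets_cons (x : String) (l : List String) :
    sortedSubsets (x :: l) = (sortedSubsets l).flatMap (fun sub => [sub, insertSorted x sub]) := by
  show (sortedSubsets l).foldl (fun out sub => out ++ [sub] ++ [insertSorted x sub]) [] = _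
  have : (fun (out : List (List String)) sub => out ++ [sub] ++ [insertSorted x sub])
      = fun out sub => out ++ ([sub] ++ [insertSorted x sub]) := by
    funext out sub; simp
  rw [this, PySem.List.foldl_append_eq_flatMap]
  rfl

-- A's sorted powerset list equals B's recursively built one, elementwise and in order
theorem pySubsets_eq_sortedSubsets (l : List String) : pySubsets l = sortedSubsets l := by
  induction l with
  | nil => rfl
  | cons x rest ih =>
    simp only [pySubsets] at ih ⊢
    rw [rawSubsets_cons, sortedSubsets_cons, ← ih]
    simp only [List.map_flatMap, List.flatMap_map]
    apply List.flatMap_congr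
    intro S _
    simp [sort_cons]

-- the character list of '-'.join
theorem join_dash_chars (a : String) (rest : List String) :
    PySem.Chars.join ['-'] (a.toList :: rest.map String.toList)
      = a.toList ++ rest.flatMap (fun x => '-' :: x.toList) := by
  induction rest generalizing a with
  | nil => simp [PySem.Chars.join_singleton]
  | cons b rs ih =>
    rw [List.map_cons, PySem.Chars.join_cons_cons, ih b]
    simp

-- A's minus-prefixed accumulation with the first char dropped is '-'.join
theorem nameA_eq_join (T : List String) :
    String.ofList (PySem.List.slice (T.foldl (fun t x => t ++ ('-' :: x.toList)) []) (some 1) none)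
      = PySem.Str.join "-" T := by
  rw [PySem.List.slice_from_one]
  cases T with
  | nil => rfl
  | cons a rest =>
    have hfold : List.foldl (fun t x => t ++ ('-' :: x.toList)) [] (a :: rest)
        = ('-' :: a.toList) ++ rest.flatMap (fun x => '-' :: x.toList) := by
      rw [List.foldl_cons, List.nil_append]
      have : ('-' :: a.toList) = ('-' :: a.toList) ++ ([] : List Char) := by simp
      rw [PySem.List.foldl_append_eq_flatMap (fun x => '-' :: x.toList) rest ('-' :: a.toList)]
    rw [hfold]
    show String.ofList (List.tail _) = _
    rw [List.cons_append, List.tail_cons]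
    have : PySem.Str.join "-" (a :: rest)
        = String.ofList (PySem.Chars.join ['-'] (a.toList :: rest.map String.toList)) := rfl
    rw [this, join_dash_chars]

-- discarding '' after the fold = skipping empty names during the fold
theorem mem_discard_ne (s : List String) (a : String) (ha : a ≠ "") :
    a ∈ PySem.Set.discard s "" ↔ a ∈ s := by
  simp [PySem.Set.discard, List.mem_filter, ha]

theorem step_discard (s : List String) (n : String) :
    PySem.Set.discard (PySem.Set.add s n) ""
      = if n = "" then PySem.Set.discard s ""
        else PySem.Set.add (PySem.Set.discard s "") n := by
  by_cases hn : n = ""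
  · subst hn
    simp only [PySem.Set.add, PySem.Set.contains]
    by_cases hm : "" ∈ s
    · simp [List.contains_eq_mem, hm]
    · simp [List.contains_eq_mem, hm, PySem.Set.discard, List.filter_append]
  · simp only [if_neg hn, PySem.Set.add, PySem.Set.contains, List.contains_eq_mem]
    by_cases hm : n ∈ s
    · simp [hm, (mem_discard_ne s n hn).mpr hm]
    · have : n ∉ PySem.Set.discard s "" := fun h => hm ((mem_discard_ne s n hn).mp h)
      simp [hm, PySem.Set.discard, List.filter_append, hn]

theorem discard_foldl_add (ns : List String) :
    ∀ (s : List String),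
    PySem.Set.discard (ns.foldl PySem.Set.add s) ""
      = ns.foldl (fun s n => if n = "" then s else PySem.Set.add s n) (PySem.Set.discard s "") := by
  induction ns with
  | nil => intro s; rfl
  | cons n ns ih =>
    intro s
    simp only [List.foldl_cons]
    rw [ih (PySem.Set.add s n), step_discard]

theorem discard_of_not_contains (s : List String) (h : PySem.Set.contains s "" = false) :
    PySem.Set.discard s "" = s := by
  have h' : "" ∉ s := by simpa [PySem.Set.contains, List.contains_eq_mem] using h
  apply List.filter_eq_self.mpr
  intro a ha
  simp only [Bool.not_eq_true', beq_eq_false_iff_ne, ne_eq]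
  exact fun e => h' (e ▸ ha)

-- ===== VERDICT (by name: the statement is the Claim_ definition above) =====
theorem nfa_states_to_dfa_spec : Claim_equal_nfa_states_to_dfa := by
  intro states _
  unfold Spec_nfa_states_to_dfa nfa_states_to_dfa nfa_states_to_dfa_alt
  simp only []
  -- turn both folds into folds over the lists of joined names
  rw [show (fun (s : PySem.Set String) state =>
        PySem.Set.add s (String.ofList
          (PySem.List.slice (List.foldl (fun t x => t ++ ('-' :: x.toList)) [] state) (some 1) none)))
      = (fun (s : PySem.Set String) state => PySem.Set.add s (PySem.Str.join "-" state)) from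
    funext fun s => funext fun state => by rw [nameA_eq_join]]
  rw [pySubsets_eq_sortedSubsets]
  rw [show List.foldl (fun (s : PySem.Set String) state => PySem.Set.add s (PySem.Str.join "-" state))
        (PySem.Set.ofList ["@"]) (sortedSubsets states)
      = List.foldl PySem.Set.add (PySem.Set.ofList ["@"])
          ((sortedSubsets states).map (PySem.Str.join "-")) from (List.foldl_map).symm]
  rw [show List.foldl (fun (s : PySem.Set String) sub =>
        let name := PySem.Str.join "-" sub
        if name = "" then s else PySem.Set.add s name) (PySem.Set.ofList ["@"]) (sortedSubsets states)
      = List.foldl (fun s n => if n = "" then s else PySem.Set.add s n) (PySem.Set.ofList ["@"])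
          ((sortedSubsets states).map (PySem.Str.join "-")) from
    (List.foldl_map (f := PySem.Str.join "-")
      (g := fun s n => if n = "" then s else PySem.Set.add s n)).symm]
  set ns := (sortedSubsets states).map (PySem.Str.join "-") with hns
  by_cases hc : PySem.Set.contains (ns.foldl PySem.Set.add (PySem.Set.ofList ["@"])) ""
  · rw [if_pos hc, discard_foldl_add]
    rw [show PySem.Set.discard (PySem.Set.ofList ["@"]) "" = PySem.Set.ofList ["@"] by decide]
  · have hc' : PySem.Set.contains (ns.foldl PySem.Set.add (PySem.Set.ofList ["@"])) "" = false :=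
      eq_false_of_ne_true hc
    rw [if_neg hc, ← discard_of_not_contains (ns.foldl PySem.Set.add (PySem.Set.ofList ["@"])) hc',
      discard_foldl_add]
    rw [show PySem.Set.discard (PySem.Set.ofList ["@"]) "" = PySem.Set.ofList ["@"] by decide]
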